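-- pv_equiv track=rewrite | github.com/Lucas-Armand/ERMES-CC | mainBot_0.6/mainbot.py | tokenConcatenation
-- ===== SOURCE A (Python) =====
-- def tokenConcatenation(tokens):
--
--     # Não entendi porque essa função está sendo utilizada;
--
--     #
--     concatenationList = ['bom', 'boa','dia','tudo','como','meu','mais']
--     #
--     tok_buffer = ''
--     new_tokens = []
--     for tok in tokens:
--         if tok_buffer != '':
--             new_tok = tok_buffer+' '+tok
--             new_tokens.append(new_tok)
--             tok_buffer = ''
--         else:
--             if tok in concatenationList:
--                 tok_buffer = tok
--             else:
--                 new_tokens.append(tok)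
--     return new_tokens
-- ===== SOURCE B (Python) =====
-- def tokenConcatenation(tokens):
--     concatenationList = {'bom', 'boa', 'dia', 'tudo', 'como', 'meu', 'mais'}
--     new_tokens = []
--     i = 0
--     n = len(tokens)
--     while i < n:
--         if tokens[i] in concatenationList:
--             if i + 1 < n:
--                 new_tokens.append(tokens[i] + ' ' + tokens[i + 1])
--             # a trailing greeting token is dropped either way
--             i += 2
--         else:
--             new_tokens.append(tokens[i])
--             i += 1
--     return new_tokens
-- ===== Notes on version B (the rewrite author's own statement) =====
-- stated objective: simpler
-- what changed: Replaces the buffer-flag state machine (tok_buffer carried across iterations) with a buffer-free index loop that pairs a greeting token directly with its successor and advances by two.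
import Mathlib
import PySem

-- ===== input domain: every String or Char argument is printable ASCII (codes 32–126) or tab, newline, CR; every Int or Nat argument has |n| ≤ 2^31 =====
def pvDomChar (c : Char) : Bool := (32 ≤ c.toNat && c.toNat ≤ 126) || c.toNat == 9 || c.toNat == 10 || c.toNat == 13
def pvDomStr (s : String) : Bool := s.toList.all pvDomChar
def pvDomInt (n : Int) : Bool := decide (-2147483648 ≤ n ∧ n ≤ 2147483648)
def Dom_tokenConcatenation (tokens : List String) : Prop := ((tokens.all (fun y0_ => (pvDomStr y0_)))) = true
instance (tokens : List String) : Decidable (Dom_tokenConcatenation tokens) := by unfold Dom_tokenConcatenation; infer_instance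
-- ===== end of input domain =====

-- B replaces A's buffer-flag state machine by a buffer-free two-step index loop (simpler decomposition; same cost).

-- ===== PORT A =====
-- A's loop: state (tok_buffer, new_tokens), folded over the tokens in order.
def pvConcatList : List String := ["bom", "boa", "dia", "tudo", "como", "meu", "mais"]

def tokenConcatenation (tokens : List String) : List String :=
  (tokens.foldl
    (fun (st : String × List String) tok =>
      if st.1 ≠ "" then ("", st.2 ++ [st.1 ++ " " ++ tok])
      else if tok ∈ pvConcatList then (tok, st.2)
      else (st.1, st.2 ++ [tok]))
    ("", [])).2

-- ===== PORT B =====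
-- B's while-loop over the index, advancing by 2 after a greeting token: structural
-- recursion consuming one or two leading tokens per step, no buffer state.
def tokenConcatenation_alt (tokens : List String) : List String :=
  match tokens with
  | [] => []
  | t :: rest =>
    if t ∈ pvConcatList then
      match rest with
      | [] => []                                   -- trailing greeting token is dropped
      | u :: rest' => (t ++ " " ++ u) :: tokenConcatenation_alt rest'
    else t :: tokenConcatenation_alt rest

-- ===== PRECONDITION & SPEC =====
def Spec_tokenConcatenation (tokens : List String) (out : List String) : Prop := out = tokenConcatenation_alt tokens
instance (tokens : List String) (out : List String) : Decidable (Spec_tokenConcatenation tokens out) := by unfold Spec_tokenConcatenation; infer_instance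

-- ===== CLAIM (what is proved, stated in full; the proofs are below) =====
def Claim_equal_tokenConcatenation : Prop := ∀ (tokens : List String), Dom_tokenConcatenation tokens → Spec_tokenConcatenation tokens (tokenConcatenation tokens)

-- ===== LEMMAS AND PROOFS =====

theorem mem_concatList_ne_empty {t : String} (h : t ∈ pvConcatList) : t ≠ "" := by
  simp [pvConcatList] at h
  rcases h with h | h | h | h | h | h | h <;> subst h <;> decide

-- A's fold starting from an empty buffer produces acc ++ B's result.
theorem foldA_eq (tokens : List String) : ∀ acc : List String,
    (tokens.foldl
      (fun (st : String × List String) tok =>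
        if st.1 ≠ "" then ("", st.2 ++ [st.1 ++ " " ++ tok])
        else if tok ∈ pvConcatList then (tok, st.2)
        else (st.1, st.2 ++ [tok]))
      ("", acc)).2 = acc ++ tokenConcatenation_alt tokens := by
  induction tokens using tokenConcatenation_alt.induct with
  | case1 => intro acc; simp [tokenConcatenation_alt]
  | case2 t ht =>
      -- singleton greeting token: buffered token dropped
      intro acc
      simp [tokenConcatenation_alt, ht]
  | case3 t ht u rest' ih =>
      intro acc
      have hne := mem_concatList_ne_empty ht
      simp only [List.foldl, tokenConcatenation_alt, ne_eq, not_true_eq_false,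
        if_false, if_pos ht, if_pos hne]
      rw [ih]
      simp
  | case4 t rest ht ih =>
      intro acc
      simp only [List.foldl, ne_eq, not_true_eq_false, if_false, if_neg ht]
      rw [ih]
      conv_rhs => rw [tokenConcatenation_alt.eq_def]
      simp [ht]

-- ===== VERDICT (by name: the statement is the Claim_ definition above) =====
theorem tokenConcatenation_spec : Claim_equal_tokenConcatenation := by
  intro tokens _
  unfold Spec_tokenConcatenation tokenConcatenation
  simpa using foldA_eq tokens []
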